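-- pv_equiv track=rewrite | github.com/albuquef/Metaheuristics-Codes | src/GA_Himmelblau-Function.py | SumBits_XY
-- ===== SOURCE A (Python) =====
-- def SumBits_XY(chromosome):
--
--     z,t = 0,1
--     xbit_sum = 0
--     for i in range((len(chromosome)//2)):
--         xbit = chromosome[-t]*(2**z)
--         xbit_sum += xbit
--         t+=1
--         z+=1
--
--     z,t = 0,1+(len(chromosome)//2)
--     ybit_sum = 0
--     for i in range((len(chromosome)//2)):
--         ybit = chromosome[-t]*(2**z)
--         ybit_sum += ybit
--         t+=1
--         z+=1
--
--     return xbit_sum,ybit_sum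
-- ===== SOURCE B (Python) =====
-- def SumBits_XY(chromosome):
--     L = len(chromosome)
--     half = L // 2
--
--     def horner(bits):
--         acc = 0
--         for b in bits:
--             acc = acc * 2 + b
--         return acc
--
--     x = horner(chromosome[L - half:L])
--     y = horner(chromosome[L - 2 * half:L - half])
--     return x, y
-- ===== Notes on version B (the rewrite author's own statement) =====
-- stated objective: faster
-- what changed: Replaces the two index-counting loops with chromosome[-t]*(2**z) by slicing the two halves and folding each with Horner's rule (acc = acc*2 + bit), avoiding negative indexing and per-step bignum exponentiation.
import Mathlib
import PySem

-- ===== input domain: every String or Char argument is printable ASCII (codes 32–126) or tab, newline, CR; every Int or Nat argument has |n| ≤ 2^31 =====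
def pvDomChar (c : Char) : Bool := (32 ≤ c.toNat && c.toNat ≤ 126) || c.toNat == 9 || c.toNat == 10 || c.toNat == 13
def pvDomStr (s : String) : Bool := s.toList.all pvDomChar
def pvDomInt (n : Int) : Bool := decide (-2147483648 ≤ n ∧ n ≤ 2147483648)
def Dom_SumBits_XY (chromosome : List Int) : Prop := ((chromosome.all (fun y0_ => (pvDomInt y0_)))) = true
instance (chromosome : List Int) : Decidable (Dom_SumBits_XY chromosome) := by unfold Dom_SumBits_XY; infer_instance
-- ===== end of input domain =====

-- B replaces A's two index-counting loops (chromosome[-t] * 2**z) by slicing the two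
-- halves and folding each with Horner's rule (no per-step 2**z power); objective: faster.


-- ===== PORT A =====
-- state is (z, t, bit_sum); chromosome[-t] is PySem.List.pyGet? with negative index,
-- defaulted (the default is never used: 1 ≤ t ≤ len on every iteration)
def SumBits_XY (chromosome : List Int) : Int × Int :=
  let half := chromosome.length / 2
  let xst := (List.range half).foldl
    (fun (st : Int × Int × Int) _ =>
      (st.1 + 1, st.2.1 + 1,
        st.2.2 + (PySem.List.pyGet? chromosome (-st.2.1)).getD 0 * 2 ^ st.1.toNat))
    (0, 1, 0)
  let yst := (List.range half).foldl
    (fun (st : Int × Int × Int) _ =>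
      (st.1 + 1, st.2.1 + 1,
        st.2.2 + (PySem.List.pyGet? chromosome (-st.2.1)).getD 0 * 2 ^ st.1.toNat))
    (0, 1 + (half : Int), 0)
  (xst.2.2, yst.2.2)

-- ===== PORT B =====
def pvHorner (bits : List Int) : Int :=
  bits.foldl (fun acc b => acc * 2 + b) 0

def SumBits_XY_alt (chromosome : List Int) : Int × Int :=
  let L : Int := chromosome.length
  let half : Int := PySem.Int.floordiv L 2
  let x := pvHorner (PySem.List.slice chromosome (some (L - half)) (some L))
  let y := pvHorner (PySem.List.slice chromosome (some (L - 2 * half)) (some (L - half)))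
  (x, y)

-- ===== PRECONDITION & SPEC =====
def Spec_SumBits_XY (chromosome : List Int) (out : Int × Int) : Prop := out = SumBits_XY_alt chromosome
instance (chromosome : List Int) (out : Int × Int) : Decidable (Spec_SumBits_XY chromosome out) := by unfold Spec_SumBits_XY; infer_instance

-- ===== CLAIM (what is proved, stated in full; the proofs are below) =====
def Claim_equal_SumBits_XY : Prop := ∀ (chromosome : List Int), Dom_SumBits_XY chromosome → Spec_SumBits_XY chromosome (SumBits_XY chromosome)

-- ===== LEMMAS AND PROOFS =====

-- LSB-first value of a bit list: lsbVal [b0, b1, …] = Σ bᵢ · 2^i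
def lsbVal : List Int → Int
  | [] => 0
  | b :: bs => b + 2 * lsbVal bs

theorem lsbVal_append_single (xs : List Int) (b : Int) :
    lsbVal (xs ++ [b]) = lsbVal xs + b * 2 ^ xs.length := by
  induction xs with
  | nil => simp [lsbVal]
  | cons a as ih => simp [lsbVal, ih, pow_succ]; ring

theorem horner_eq_lsb (l : List Int) : ∀ a : Int,
    l.foldl (fun acc b => acc * 2 + b) a = a * 2 ^ l.length + lsbVal l.reverse := by
  induction l with
  | nil => intro a; simp [lsbVal]
  | cons b bs ih =>
    intro a
    simp only [List.foldl_cons, ih, List.reverse_cons, lsbVal_append_single,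
      List.length_cons, List.length_reverse, pow_succ]
    ring

-- invariant of A's loop: starting at (z, t, s) = (0, o+1, 0), after k iterations the
-- state is (k, o+k+1, lsbVal of the k reversed bits starting o from the end)
theorem loopA_inv (cs : List Int) (o : Nat) : ∀ k : Nat, o + k ≤ cs.length →
    (List.range k).foldl
      (fun (st : Int × Int × Int) _ =>
        (st.1 + 1, st.2.1 + 1,
          st.2.2 + (PySem.List.pyGet? cs (-st.2.1)).getD 0 * 2 ^ st.1.toNat))
      (0, (o : Int) + 1, 0)
      = ((k : Int), (o : Int) + (k : Int) + 1, lsbVal ((cs.reverse.drop o).take k)) := by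
  intro k
  induction k with
  | zero => intro _; simp [lsbVal]
  | succ k ih =>
    intro hk
    have hk' : o + k ≤ cs.length := by omega
    rw [List.range_succ, List.foldl_append, ih hk']
    simp only [List.foldl_cons, List.foldl_nil]
    have hlen : o + k + 1 ≤ cs.length := hk
    have hget : PySem.List.pyGet? cs (-(((o : Int) + (k : Int) + 1))) =
        some (cs[cs.length - (o + k + 1)]'(by omega)) := by
      have h1 : ((o : Int) + (k : Int) + 1) = ((o + k + 1 : Nat) : Int) := by push_cast; ring
      rw [h1, PySem.List.pyGet?_neg_natCast cs (o + k + 1) (by omega) (by omega)]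
      exact List.getElem?_eq_getElem (by omega)
    have hkd : k < (cs.reverse.drop o).length := by simp; omega
    have htake : (cs.reverse.drop o).take (k + 1)
        = (cs.reverse.drop o).take k ++ [(cs.reverse.drop o)[k]'hkd] := by
      rw [List.take_add_one, List.getElem?_eq_getElem hkd]; rfl
    have helem : (cs.reverse.drop o)[k]'hkd = cs[cs.length - (o + k + 1)]'(by omega) := by
      rw [List.getElem_drop, List.getElem_reverse]
      congr 1; omega
    rw [htake, lsbVal_append_single, hget]
    have hlt : ((cs.reverse.drop o).take k).length = k := by simp; omega
    have hz : ((k : Int)).toNat = k := by omega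
    rw [hlt, hz, helem]
    refine Prod.ext (by push_cast; ring) (Prod.ext (by push_cast; ring) ?_)
    rfl

theorem floordiv_two_natCast (n : Nat) : PySem.Int.floordiv (n : Int) 2 = ((n / 2 : Nat) : Int) := by
  exact_mod_cast PySem.Int.floordiv_natCast n 2

-- ===== VERDICT (by name: the statement is the Claim_ definition above) =====
theorem SumBits_XY_spec : Claim_equal_SumBits_XY := by
  intro cs _
  unfold Spec_SumBits_XY SumBits_XY SumBits_XY_alt pvHorner
  simp only
  set n := cs.length with hn
  set h := n / 2 with hh
  have h2 : 2 * h ≤ n := by omega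
  have hfd : PySem.Int.floordiv (n : Int) 2 = (h : Int) := floordiv_two_natCast n
  rw [hfd]
  have hxA := loopA_inv cs 0 h (by omega)
  have hyA := loopA_inv cs h h (by omega)
  simp only [Nat.cast_zero, zero_add] at hxA
  have hsx : PySem.List.slice cs (some ((n : Int) - (h : Int))) (some (n : Int))
      = cs.drop (n - h) := by
    have e1 : (n : Int) - (h : Int) = ((n - h : Nat) : Int) := by omega
    rw [e1, PySem.List.slice_natCast]
    apply List.take_of_length_le
    simp [hn]
  have hsy : PySem.List.slice cs (some ((n : Int) - 2 * (h : Int))) (some ((n : Int) - (h : Int)))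
      = (cs.drop (n - 2 * h)).take h := by
    have e1 : (n : Int) - 2 * (h : Int) = ((n - 2 * h : Nat) : Int) := by omega
    have e2 : (n : Int) - (h : Int) = ((n - h : Nat) : Int) := by omega
    rw [e1, e2, PySem.List.slice_natCast]
    congr 1
    omega
  have e0 : (1 + (h : Int)) = (h : Int) + 1 := by ring
  rw [hsx, hsy, horner_eq_lsb, horner_eq_lsb, hxA, e0, hyA]
  have hxl : (cs.drop (n - h)).reverse = cs.reverse.take h := by
    rw [List.reverse_drop]
    congr 1; omega
  have hyl : ((cs.drop (n - 2 * h)).take h).reverse = (cs.reverse.drop h).take h := by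
    rw [List.drop_reverse, List.take_reverse]
    have e1 : (cs.take (n - h)).length = n - h := by simp [hn]
    rw [e1, List.drop_take]
    have g1 : cs.length - h - (n - h - h) = h := by omega
    have g2 : n - h - h = n - 2 * h := by omega
    rw [g1, g2]
  rw [hxl, hyl]
  simp [List.drop_zero]
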